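-- pv_equiv track=rewrite | github.com/durgaprasadyarlagadda/Project_files | server.py | parse_form_data
-- ===== SOURCE A (Python) =====
-- def parse_form_data(data):
--     form_data = {}
--     items = data.split('&')
--     for item in items:
--         if '=' in item:
--             key, value = item.split('=', 1)
--             form_data[key] = value
--     return form_data
-- ===== SOURCE B (Python) =====
-- def parse_form_data(data):
--     form_data = {}
--     key, val, seen_eq = [], [], False
--     for c in data:
--         if c == '&':
--             if seen_eq:
--                 form_data[''.join(key)] = ''.join(val)
--             key, val, seen_eq = [], [], False
--         elif c == '=' and not seen_eq:
--             seen_eq = True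
--         elif seen_eq:
--             val.append(c)
--         else:
--             key.append(c)
--     if seen_eq:
--         form_data[''.join(key)] = ''.join(val)
--     return form_data
-- ===== Notes on version B (the rewrite author's own statement) =====
-- stated objective: alternative
-- what changed: B replaces A's split('&') loop with nested split('=',1) by a single left-to-right character scan (state machine with key/value buffers and a seen-equals flag), building the dict in one pass without ever materialising the segment list.
import Mathlib
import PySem

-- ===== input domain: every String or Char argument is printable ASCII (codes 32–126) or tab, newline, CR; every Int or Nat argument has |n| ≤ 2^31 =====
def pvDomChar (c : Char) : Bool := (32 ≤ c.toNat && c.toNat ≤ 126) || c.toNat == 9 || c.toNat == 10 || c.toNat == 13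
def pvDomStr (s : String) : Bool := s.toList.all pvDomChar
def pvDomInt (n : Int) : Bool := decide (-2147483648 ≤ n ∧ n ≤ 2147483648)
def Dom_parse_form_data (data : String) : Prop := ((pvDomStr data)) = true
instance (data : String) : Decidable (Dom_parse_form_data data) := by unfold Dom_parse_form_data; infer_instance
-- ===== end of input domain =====

-- B replaces A's split('&') pass with nested split('=',1) by a single character-scan state machine (same O(n) cost, different algorithm).

-- ===== PORT A =====
-- loop body of A's 'for item in items' (if '=' in item: key, value = item.split('=', 1); form_data[key] = value)
def pvItemA (d : PySem.Dict String String) (item : List Char) : PySem.Dict String String :=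
  if PySem.Chars.isIn ['='] item then
    match PySem.Chars.splitOnMax item ['='] 1 with
    | [key, value] => d.insert (String.ofList key) (String.ofList value)
    | _ => d
  else d

def parse_form_data (data : String) : List (String × String) :=
  ((PySem.Chars.splitOn data.toList ['&']).foldl pvItemA PySem.Dict.empty).items

-- ===== PORT B =====
-- one step of B's character scan: state = (form_data, key chars, val chars, seen_eq)
def pvStepB (st : PySem.Dict String String × List Char × List Char × Bool) (c : Char) :
    PySem.Dict String String × List Char × List Char × Bool :=
  let (d, key, val, seen) := st
  if c = '&' then
    ((if seen then d.insert (String.ofList key) (String.ofList val) else d), [], [], false)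
  else if c = '=' ∧ seen = false then (d, key, val, true)
  else if seen then (d, key, val ++ [c], true)
  else (d, key ++ [c], val, false)

def parse_form_data_alt (data : String) : List (String × String) :=
  let st := data.toList.foldl pvStepB (PySem.Dict.empty, [], [], false)
  (if st.2.2.2 then st.1.insert (String.ofList st.2.1) (String.ofList st.2.2.1) else st.1).items

-- ===== PRECONDITION & SPEC =====
def Spec_parse_form_data (data : String) (out : List (String × String)) : Prop := out = parse_form_data_alt data
instance (data : String) (out : List (String × String)) : Decidable (Spec_parse_form_data data out) := by unfold Spec_parse_form_data; infer_instance

-- ===== CLAIM (what is proved, stated in full; the proofs are below) =====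
def Claim_equal_parse_form_data : Prop := ∀ (data : String), Dom_parse_form_data data → Spec_parse_form_data data (parse_form_data data)

-- ===== LEMMAS AND PROOFS =====

-- proof-side: item.split('=', 1) as a structural recursion, the partial piece accumulated in front
def pvSplit1 (pre : List Char) : List Char → List (List Char)
  | [] => [pre]
  | c :: rest => if c = '=' then [pre, rest] else pvSplit1 (pre ++ [c]) rest

-- proof-side: data.split('&') as a structural recursion
def pvSegs (pre : List Char) : List Char → List (List Char)
  | [] => [pre]
  | c :: rest => if c = '&' then pre :: pvSegs [] rest else pvSegs (pre ++ [c]) rest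

lemma pvGo0 (fuel : Nat) (l cur : List Char) (acc : List (List Char)) :
    PySem.Chars.splitOnMax.go ['='] fuel 0 l cur acc = acc.reverse ++ [cur.reverse ++ l] := by
  cases fuel with
  | zero => simp [PySem.Chars.splitOnMax.go]
  | succ n => cases l with
    | nil => simp [PySem.Chars.splitOnMax.go]
    | cons c rest => simp [PySem.Chars.splitOnMax.go]

lemma pvGo1 (fuel : Nat) : ∀ (l cur : List Char) (acc : List (List Char)), l.length ≤ fuel →
    PySem.Chars.splitOnMax.go ['='] fuel 1 l cur acc = acc.reverse ++ pvSplit1 cur.reverse l := by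
  induction fuel with
  | zero =>
    intro l cur acc h
    have : l = [] := by cases l <;> simp_all
    subst this
    simp [PySem.Chars.splitOnMax.go, pvSplit1]
  | succ n ih =>
    intro l cur acc h
    cases l with
    | nil => simp [PySem.Chars.splitOnMax.go, pvSplit1]
    | cons c rest =>
      by_cases hc : c = '='
      · subst hc
        simp only [PySem.Chars.splitOnMax.go, pvSplit1]
        simp [List.isPrefixOf, pvGo0]
      · simp only [PySem.Chars.splitOnMax.go, pvSplit1]
        rw [if_neg (by simp), if_neg (by simp; exact fun h2 => hc h2.symm),
          ih rest (c :: cur) acc (by simpa using h)]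
        simp [hc]

lemma pvSplitOnMax_eq (l : List Char) : PySem.Chars.splitOnMax l ['='] 1 = pvSplit1 [] l := by
  rw [PySem.Chars.splitOnMax]
  simp only [show ¬((1:Int) < 0) by norm_num, if_false, show Int.toNat 1 = 1 from rfl]
  rw [pvGo1 (l.length + 1) l [] [] (by omega)]
  simp

lemma pvGoAmp (fuel : Nat) : ∀ (l cur : List Char) (acc : List (List Char)), l.length ≤ fuel →
    PySem.Chars.splitOn.go ['&'] fuel l cur acc = acc.reverse ++ pvSegs cur.reverse l := by
  induction fuel with
  | zero =>
    intro l cur acc h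
    have : l = [] := by cases l <;> simp_all
    subst this
    simp [PySem.Chars.splitOn.go, pvSegs]
  | succ n ih =>
    intro l cur acc h
    cases l with
    | nil => simp [PySem.Chars.splitOn.go, pvSegs]
    | cons c rest =>
      by_cases hc : c = '&'
      · subst hc
        simp only [PySem.Chars.splitOn.go, pvSegs]
        rw [if_pos (by simp), show List.drop ['&'].length ('&' :: rest) = rest from rfl,
          ih rest [] (cur.reverse :: acc) (by simpa using h)]
        simp
      · simp only [PySem.Chars.splitOn.go, pvSegs]
        rw [if_neg (by simp; exact fun h2 => hc h2.symm), ih rest (c :: cur) acc (by simpa using h)]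
        simp [hc]

lemma pvSplitOn_eq (l : List Char) : PySem.Chars.splitOn l ['&'] = pvSegs [] l := by
  rw [PySem.Chars.splitOn, pvGoAmp (l.length + 1) l [] [] (by omega)]
  simp

lemma pvIsIn_singleton (a : Char) (s : List Char) : PySem.Chars.isIn [a] s = true ↔ a ∈ s := by
  rw [PySem.Chars.isIn_iff_infix]
  exact List.singleton_infix_iff a s

lemma pvSplit1_yes (pre key val : List Char) (h : '=' ∉ key) :
    pvSplit1 pre (key ++ '=' :: val) = [pre ++ key, val] := by
  induction key generalizing pre with
  | nil => simp [pvSplit1]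
  | cons c rest ih =>
    simp only [List.mem_cons, not_or] at h
    rw [List.cons_append, pvSplit1, if_neg (fun h2 => h.1 h2.symm), ih (pre ++ [c]) h.2]
    simp

lemma pvItemA_no (d : PySem.Dict String String) (s : List Char) (h : '=' ∉ s) : pvItemA d s = d := by
  rw [pvItemA, if_neg (fun hc => h ((pvIsIn_singleton _ _).1 hc))]

lemma pvItemA_yes (d : PySem.Dict String String) (key val : List Char) (h : '=' ∉ key) :
    pvItemA d (key ++ '=' :: val) = d.insert (String.ofList key) (String.ofList val) := by
  rw [pvItemA, if_pos ((pvIsIn_singleton _ _).2 (by simp)), pvSplitOnMax_eq,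
    pvSplit1_yes [] key val h]
  simp

-- finishing step of B
def pvFinB (st : PySem.Dict String String × List Char × List Char × Bool) : PySem.Dict String String :=
  if st.2.2.2 then st.1.insert (String.ofList st.2.1) (String.ofList st.2.2.1) else st.1

lemma pvScan_eq (l : List Char) : ∀ (d : PySem.Dict String String) (key val : List Char) (seen : Bool),
    '=' ∉ key → (seen = false → val = []) →
    pvFinB (l.foldl pvStepB (d, key, val, seen))
      = (pvSegs (key ++ if seen then '=' :: val else []) l).foldl pvItemA d := by
  induction l with
  | nil =>
    intro d key val seen h hv
    cases seen with
    | false =>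
      rw [hv rfl]
      simp [pvFinB, pvSegs, pvItemA_no d key h]
    | true => simp [pvFinB, pvSegs, pvItemA_yes d key val h]
  | cons c rest ih =>
    intro d key val seen h hv
    rw [List.foldl_cons]
    by_cases hc : c = '&'
    · subst hc
      have hstep : pvStepB (d, key, val, seen) '&' =
          ((if seen then d.insert (String.ofList key) (String.ofList val) else d), [], [], false) := by
        simp [pvStepB]
      rw [hstep, ih _ [] [] false (by simp) (fun _ => rfl)]
      have hseg : pvSegs (key ++ if seen then '=' :: val else []) ('&' :: rest)
          = (key ++ if seen then '=' :: val else []) :: pvSegs [] rest := by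
        simp [pvSegs]
      rw [hseg, List.foldl_cons]
      cases seen with
      | false => simp [pvItemA_no d key h]
      | true => simp [pvItemA_yes d key val h]
    · have hseg : pvSegs (key ++ if seen then '=' :: val else []) (c :: rest)
          = pvSegs ((key ++ if seen then '=' :: val else []) ++ [c]) rest := by
        simp [pvSegs, hc]
      rw [hseg]
      cases seen with
      | false =>
        rw [hv rfl]
        by_cases he : c = '='
        · subst he
          have hstep : pvStepB (d, key, [], false) '=' = (d, key, [], true) := by
            simp [pvStepB]
          rw [hstep, ih d key [] true h (by simp)]
          simp
        · have hstep : pvStepB (d, key, [], false) c = (d, key ++ [c], [], false) := by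
            simp [pvStepB, hc, he]
          rw [hstep, ih d (key ++ [c]) [] false (by simp [h]; exact fun h2 => he h2.symm) (fun _ => rfl)]
          simp
      | true =>
        have hstep : pvStepB (d, key, val, true) c = (d, key, val ++ [c], true) := by
          simp [pvStepB, hc]
        rw [hstep, ih d key (val ++ [c]) true h (by simp)]
        simp

-- ===== VERDICT (by name: the statement is the Claim_ definition above) =====
theorem parse_form_data_spec : Claim_equal_parse_form_data := by
  intro data _
  unfold Spec_parse_form_data parse_form_data parse_form_data_alt
  rw [pvSplitOn_eq]
  have := pvScan_eq data.toList PySem.Dict.empty [] [] false (by simp) (fun _ => rfl)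
  simp only [pvFinB] at this
  simp [this]
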